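-- pv_equiv track=rewrite | github.com/ghkdxodn84-oss/KORStockScan | src/engine/scalping_pattern_lab_automation.py | _normalize_route
-- ===== SOURCE A (Python) =====
-- def _normalize_route(title: str) -> dict[str, str]:
--     haystack = title.lower()
--     if any(token in haystack for token in ("ai threshold", "wait65", "wait65~79", "score65", "submitted drought")):
--         return {
--             "route": "existing_family",
--             "family": "score65_74_recovery_probe",
--             "stage": "entry",
--             "target_subsystem": "entry_funnel",
--         }
--     if any(token in haystack for token in ("gatekeeper latency", "latency", "quote_fresh", "lock/model")):
--         return {
--             "route": "instrumentation_order",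
--             "family": "",
--             "stage": "runtime_ops",
--             "target_subsystem": "runtime_instrumentation",
--         }
--     if any(token in haystack for token in ("soft_stop", "soft-stop", "same_symbol", "same-symbol")):
--         return {
--             "route": "existing_family",
--             "family": "soft_stop_whipsaw_confirmation",
--             "stage": "holding_exit",
--             "target_subsystem": "holding_exit",
--         }
--     if any(token in haystack for token in ("split-entry", "split entry", "bad_entry", "rebase", "partial")):
--         return {
--             "route": "existing_family",
--             "family": "bad_entry_refined_canary",
--             "stage": "holding_exit",
--             "target_subsystem": "holding_exit",
--         }
--     if any(token in haystack for token in ("overbought", "liquidity")):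
--         return {
--             "route": "auto_family_candidate",
--             "family": "",
--             "stage": "entry",
--             "target_subsystem": "entry_filter_quality",
--         }
--     return {
--         "route": "auto_family_candidate",
--         "family": "",
--         "stage": "unknown",
--         "target_subsystem": "scalping_logic",
--     }
-- ===== SOURCE B (Python) =====
-- # B: inverted index — one flat pass computes the minimum priority among ALL matching
-- # tokens (no branch chain, no early return), then a single lookup in an outcomes array.
-- _GROUPS = [
--     ("ai threshold", "wait65", "wait65~79", "score65", "submitted drought"),
--     ("gatekeeper latency", "latency", "quote_fresh", "lock/model"),
--     ("soft_stop", "soft-stop", "same_symbol", "same-symbol"),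
--     ("split-entry", "split entry", "bad_entry", "rebase", "partial"),
--     ("overbought", "liquidity"),
-- ]
--
-- # flat token -> priority index
-- _TOKENS = [(token, prio) for prio, group in enumerate(_GROUPS) for token in group]
--
-- _OUTCOMES = [
--     {"route": "existing_family", "family": "score65_74_recovery_probe",
--      "stage": "entry", "target_subsystem": "entry_funnel"},
--     {"route": "instrumentation_order", "family": "",
--      "stage": "runtime_ops", "target_subsystem": "runtime_instrumentation"},
--     {"route": "existing_family", "family": "soft_stop_whipsaw_confirmation",
--      "stage": "holding_exit", "target_subsystem": "holding_exit"},
--     {"route": "existing_family", "family": "bad_entry_refined_canary",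
--      "stage": "holding_exit", "target_subsystem": "holding_exit"},
--     {"route": "auto_family_candidate", "family": "",
--      "stage": "entry", "target_subsystem": "entry_filter_quality"},
--     {"route": "auto_family_candidate", "family": "",
--      "stage": "unknown", "target_subsystem": "scalping_logic"},
-- ]
--
--
-- def _normalize_route(title: str) -> dict[str, str]:
--     haystack = title.lower()
--     best = 5
--     for token, prio in _TOKENS:
--         if token in haystack:
--             best = min(best, prio)
--     return dict(_OUTCOMES[best])
-- ===== Notes on version B (the rewrite author's own statement) =====
-- stated objective: alternative
-- what changed: Replaced the early-return if-ladder with an inverted flat token-to-priority index: one exhaustive pass computes the minimum matching priority, then a single array lookup yields the outcome.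
import Mathlib
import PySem

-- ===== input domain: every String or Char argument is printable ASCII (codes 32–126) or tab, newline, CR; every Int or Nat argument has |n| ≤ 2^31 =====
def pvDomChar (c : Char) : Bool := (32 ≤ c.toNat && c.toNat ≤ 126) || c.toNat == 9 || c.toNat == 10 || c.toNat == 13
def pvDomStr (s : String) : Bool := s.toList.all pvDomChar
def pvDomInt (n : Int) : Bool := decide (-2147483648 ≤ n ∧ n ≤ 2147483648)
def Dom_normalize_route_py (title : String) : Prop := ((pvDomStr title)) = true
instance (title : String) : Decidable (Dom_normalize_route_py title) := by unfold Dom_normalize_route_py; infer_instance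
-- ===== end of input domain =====

-- B replaces A's early-return if-ladder by a min-reduction over a flat token->priority index plus one array lookup (alternative algorithm, same behaviour).


-- ===== PORT A =====
-- Port of A: haystack = title.lower(); if-ladder, each branch an any() over a literal token tuple.
def normalize_route_py (title : String) : List (String × String) :=
  let haystack := PySem.Str.lower title
  if (["ai threshold", "wait65", "wait65~79", "score65", "submitted drought"].any
        (fun token => PySem.Str.isIn token haystack)) then
    [("route", "existing_family"), ("family", "score65_74_recovery_probe"),
     ("stage", "entry"), ("target_subsystem", "entry_funnel")]
  else if (["gatekeeper latency", "latency", "quote_fresh", "lock/model"].any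
        (fun token => PySem.Str.isIn token haystack)) then
    [("route", "instrumentation_order"), ("family", ""),
     ("stage", "runtime_ops"), ("target_subsystem", "runtime_instrumentation")]
  else if (["soft_stop", "soft-stop", "same_symbol", "same-symbol"].any
        (fun token => PySem.Str.isIn token haystack)) then
    [("route", "existing_family"), ("family", "soft_stop_whipsaw_confirmation"),
     ("stage", "holding_exit"), ("target_subsystem", "holding_exit")]
  else if (["split-entry", "split entry", "bad_entry", "rebase", "partial"].any
        (fun token => PySem.Str.isIn token haystack)) then
    [("route", "existing_family"), ("family", "bad_entry_refined_canary"),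
     ("stage", "holding_exit"), ("target_subsystem", "holding_exit")]
  else if (["overbought", "liquidity"].any
        (fun token => PySem.Str.isIn token haystack)) then
    [("route", "auto_family_candidate"), ("family", ""),
     ("stage", "entry"), ("target_subsystem", "entry_filter_quality")]
  else
    [("route", "auto_family_candidate"), ("family", ""),
     ("stage", "unknown"), ("target_subsystem", "scalping_logic")]

-- ===== PORT B =====
-- the token groups, in priority order (B's _GROUPS)
def pvGroups : List (List String) :=
  [ ["ai threshold", "wait65", "wait65~79", "score65", "submitted drought"],
    ["gatekeeper latency", "latency", "quote_fresh", "lock/model"],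
    ["soft_stop", "soft-stop", "same_symbol", "same-symbol"],
    ["split-entry", "split entry", "bad_entry", "rebase", "partial"],
    ["overbought", "liquidity"] ]

-- B's _TOKENS: the comprehension flattening _GROUPS into (token, priority) pairs
def pvTokens : List (String × Nat) :=
  pvGroups.zipIdx.flatMap (fun gp => gp.1.map (fun token => (token, gp.2)))

-- B's _OUTCOMES array, index 5 = default
def pvOutcomes : List (List (String × String)) :=
  [ [("route", "existing_family"), ("family", "score65_74_recovery_probe"),
     ("stage", "entry"), ("target_subsystem", "entry_funnel")],
    [("route", "instrumentation_order"), ("family", ""),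
     ("stage", "runtime_ops"), ("target_subsystem", "runtime_instrumentation")],
    [("route", "existing_family"), ("family", "soft_stop_whipsaw_confirmation"),
     ("stage", "holding_exit"), ("target_subsystem", "holding_exit")],
    [("route", "existing_family"), ("family", "bad_entry_refined_canary"),
     ("stage", "holding_exit"), ("target_subsystem", "holding_exit")],
    [("route", "auto_family_candidate"), ("family", ""),
     ("stage", "entry"), ("target_subsystem", "entry_filter_quality")],
    [("route", "auto_family_candidate"), ("family", ""),
     ("stage", "unknown"), ("target_subsystem", "scalping_logic")] ]

-- Port of B: min-reduction of matching priorities over the flat token index, then one lookup.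
-- best is always ≤ 5, so _OUTCOMES[best] never raises; the .getD [] is an unreachable totaliser.
def normalize_route_py_alt (title : String) : List (String × String) :=
  let haystack := PySem.Str.lower title
  let best : Nat := pvTokens.foldl (fun best tp =>
    if PySem.Str.isIn tp.1 haystack then min best tp.2 else best) 5
  (PySem.List.pyGet? pvOutcomes (best : Int)).getD []

-- ===== PRECONDITION & SPEC =====
def Spec_normalize_route_py (title : String) (out : List (String × String)) : Prop := out = normalize_route_py_alt title
instance (title : String) (out : List (String × String)) : Decidable (Spec_normalize_route_py title out) := by unfold Spec_normalize_route_py; infer_instance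

-- ===== CLAIM (what is proved, stated in full; the proofs are below) =====
def Claim_equal_normalize_route_py : Prop := ∀ (title : String), Dom_normalize_route_py title → Spec_normalize_route_py title (normalize_route_py title)

-- ===== LEMMAS AND PROOFS =====

-- folding one priority group: matches if any of its tokens occurs
theorem pv_fold_group (h : String) (toks : List String) (p acc : Nat)
    (rest : List (String × Nat)) :
    ((toks.map (fun token => (token, p))) ++ rest).foldl
        (fun best tp => if PySem.Str.isIn tp.1 h then min best tp.2 else best) acc
      = rest.foldl (fun best tp => if PySem.Str.isIn tp.1 h then min best tp.2 else best)
          (if toks.any (fun token => PySem.Str.isIn token h) then min acc p else acc) := by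
  induction toks generalizing acc with
  | nil => simp
  | cons t ts ih =>
    simp only [List.map_cons, List.cons_append, List.foldl_cons, List.any_cons,
      Bool.or_eq_true]
    rw [ih]
    congr 1
    split_ifs <;> first | omega | tauto

-- pvTokens, spelled out as the concatenation of its five priority groups
theorem pvTokens_eq : pvTokens =
    (["ai threshold", "wait65", "wait65~79", "score65", "submitted drought"].map
        (fun token => (token, 0))) ++
    ((["gatekeeper latency", "latency", "quote_fresh", "lock/model"].map
        (fun token => (token, 1))) ++
    ((["soft_stop", "soft-stop", "same_symbol", "same-symbol"].map
        (fun token => (token, 2))) ++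
    ((["split-entry", "split entry", "bad_entry", "rebase", "partial"].map
        (fun token => (token, 3))) ++
    ((["overbought", "liquidity"].map
        (fun token => (token, 4))) ++ ([] : List (String × Nat)))))) := by
  decide

-- ===== VERDICT (by name: the statement is the Claim_ definition above) =====
theorem normalize_route_py_spec : Claim_equal_normalize_route_py := by
  intro title _
  unfold Spec_normalize_route_py normalize_route_py normalize_route_py_alt
  simp only [pvTokens_eq, pv_fold_group, List.foldl_nil]
  by_cases h0 : (["ai threshold", "wait65", "wait65~79", "score65", "submitted drought"].any
      (fun token => PySem.Str.isIn token (PySem.Str.lower title))) <;>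
  by_cases h1 : (["gatekeeper latency", "latency", "quote_fresh", "lock/model"].any
      (fun token => PySem.Str.isIn token (PySem.Str.lower title))) <;>
  by_cases h2 : (["soft_stop", "soft-stop", "same_symbol", "same-symbol"].any
      (fun token => PySem.Str.isIn token (PySem.Str.lower title))) <;>
  by_cases h3 : (["split-entry", "split entry", "bad_entry", "rebase", "partial"].any
      (fun token => PySem.Str.isIn token (PySem.Str.lower title))) <;>
  by_cases h4 : (["overbought", "liquidity"].any
      (fun token => PySem.Str.isIn token (PySem.Str.lower title))) <;>
  simp only [h0, h1, h2, h3, h4, if_true, if_false, Bool.false_eq_true] <;> decide
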